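-- pv_equiv track=rewrite | github.com/sherlock-0327/ITAI-2025 | 01_2023141490340_KangZuCheng/N-Queens.py | apply_symmetry
-- ===== SOURCE A (Python) =====
-- import copy
--
-- def apply_symmetry(solution, n, symmetry_type):
--     """对解应用对称变换"""
--     new_solution = copy.deepcopy(solution)
--
--     if symmetry_type == "horizontal":
--         # 水平对称（左右翻转）
--         for i in range(n):
--             new_solution[i] = new_solution[i][::-1]
--
--     elif symmetry_type == "vertical":
--         # 垂直对称（上下翻转）
--         new_solution = new_solution[::-1]
--
--     elif symmetry_type == "diagonal":
--         # 主对角线对称（左上到右下）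
--         for i in range(n):
--             for j in range(i + 1, n):
--                 new_solution[i][j], new_solution[j][i] = new_solution[j][i], new_solution[i][j]
--
--     elif symmetry_type == "anti_diagonal":
--         # 副对角线对称（右上到左下）
--         for i in range(n):
--             for j in range(n - i - 1):
--                 new_solution[i][j], new_solution[n - j - 1][n - i - 1] = \
--                     new_solution[n - j - 1][n - i - 1], new_solution[i][j]
--
--     elif symmetry_type == "rotate_90":
--         # 顺时针旋转90度
--         new_solution = [[0 for _ in range(n)] for _ in range(n)]
--         for i in range(n):
--             for j in range(n):
--                 new_solution[j][n - i - 1] = solution[i][j]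
--
--     elif symmetry_type == "rotate_180":
--         # 顺时针旋转180度
--         new_solution = [[0 for _ in range(n)] for _ in range(n)]
--         for i in range(n):
--             for j in range(n):
--                 new_solution[n - i - 1][n - j - 1] = solution[i][j]
--
--     elif symmetry_type == "rotate_270":
--         # 顺时针旋转270度（或逆时针旋转90度）
--         new_solution = [[0 for _ in range(n)] for _ in range(n)]
--         for i in range(n):
--             for j in range(n):
--                 new_solution[n - j - 1][i] = solution[i][j]
--
--     return new_solution
-- ===== SOURCE B (Python) =====
-- def apply_symmetry(solution, n, symmetry_type):
--     """One uniform pass: each known symmetry is a coordinate permutation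
--     (i, j) -> source cell, looked up in a table; unknown types copy the board."""
--     sources = {
--         "horizontal":    lambda i, j: (i, n - 1 - j),
--         "vertical":      lambda i, j: (n - 1 - i, j),
--         "diagonal":      lambda i, j: (j, i),
--         "anti_diagonal": lambda i, j: (n - 1 - j, n - 1 - i),
--         "rotate_90":     lambda i, j: (n - 1 - j, i),
--         "rotate_180":    lambda i, j: (n - 1 - i, n - 1 - j),
--         "rotate_270":    lambda i, j: (j, n - 1 - i),
--     }
--     src = sources.get(symmetry_type)
--     if src is None:
--         return [row[:] for row in solution]
--     return [[solution[src(i, j)[0]][src(i, j)[1]] for j in range(n)]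
--             for i in range(n)]
-- ===== Notes on version B (the rewrite author's own statement) =====
-- stated objective: simpler
-- what changed: Replaces the 7-branch if/elif of in-place row reversals, pair swaps and scatter-writes with one uniform pass that builds the result grid by reading solution at a per-type source-coordinate permutation looked up in a table (unknown types return a row-wise copy, matching A's fall-through).
-- outside the precondition, e.g. on apply_symmetry([[1, 2]], 1, 'horizontal'): A returns [[2, 1]], B returns [[1]]; on apply_symmetry([[1], [2]], 1, 'vertical'): A returns [[2], [1]], B returns [[1]]
import Mathlib
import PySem

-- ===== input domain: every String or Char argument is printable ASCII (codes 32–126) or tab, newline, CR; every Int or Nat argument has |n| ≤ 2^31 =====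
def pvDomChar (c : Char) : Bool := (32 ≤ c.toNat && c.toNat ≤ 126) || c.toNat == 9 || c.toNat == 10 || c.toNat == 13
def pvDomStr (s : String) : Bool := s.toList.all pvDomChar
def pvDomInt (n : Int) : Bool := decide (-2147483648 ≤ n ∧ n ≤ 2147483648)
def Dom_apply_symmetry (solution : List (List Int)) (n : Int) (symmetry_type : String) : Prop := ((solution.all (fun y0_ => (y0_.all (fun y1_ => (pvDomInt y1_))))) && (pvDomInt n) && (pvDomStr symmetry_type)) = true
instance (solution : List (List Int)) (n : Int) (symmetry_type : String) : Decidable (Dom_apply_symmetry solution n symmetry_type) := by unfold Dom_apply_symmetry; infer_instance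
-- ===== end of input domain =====

-- B replaces A's seven in-place transformation branches by one uniform pass reading the
-- input at a per-type source-coordinate permutation (objective: simpler).

-- ===== PORT A =====
-- Shared indexing helpers: every index below comes from range(..) bounded by n, hence is
-- ≥ 0, so `.toNat` is exact; Python raises IndexError out of range — excluded by Pre_.
def pvGet2 (g : List (List Int)) (i j : Int) : Int := (g.getD i.toNat []).getD j.toNat 0

def pvSet2 (g : List (List Int)) (i j : Int) (v : Int) : List (List Int) :=
  g.set i.toNat ((g.getD i.toNat []).set j.toNat v)

def apply_symmetry (solution : List (List Int)) (n : Int) (symmetry_type : String) : List (List Int) :=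
  -- new_solution = copy.deepcopy(solution): a value copy; lists are values in Lean
  let new0 := solution
  if symmetry_type = "horizontal" then
    (PySem.List.pyRange 0 n 1).foldl
      (fun ns i => ns.set i.toNat ((PySem.List.slice? (ns.getD i.toNat []) none none (-1)).getD [])) new0
  else if symmetry_type = "vertical" then
    (PySem.List.slice? new0 none none (-1)).getD []
  else if symmetry_type = "diagonal" then
    (PySem.List.pyRange 0 n 1).foldl (fun ns i =>
      (PySem.List.pyRange (i + 1) n 1).foldl (fun ns j =>
        let a := pvGet2 ns i j
        let b := pvGet2 ns j i
        pvSet2 (pvSet2 ns i j b) j i a) ns) new0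
  else if symmetry_type = "anti_diagonal" then
    (PySem.List.pyRange 0 n 1).foldl (fun ns i =>
      (PySem.List.pyRange 0 (n - i - 1) 1).foldl (fun ns j =>
        let a := pvGet2 ns i j
        let b := pvGet2 ns (n - j - 1) (n - i - 1)
        pvSet2 (pvSet2 ns i j b) (n - j - 1) (n - i - 1) a) ns) new0
  else if symmetry_type = "rotate_90" then
    (PySem.List.pyRange 0 n 1).foldl (fun ns i =>
      (PySem.List.pyRange 0 n 1).foldl (fun ns j =>
        pvSet2 ns j (n - i - 1) (pvGet2 solution i j)) ns)
      ((PySem.List.pyRange 0 n 1).map (fun _ => (PySem.List.pyRange 0 n 1).map (fun _ => (0 : Int))))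
  else if symmetry_type = "rotate_180" then
    (PySem.List.pyRange 0 n 1).foldl (fun ns i =>
      (PySem.List.pyRange 0 n 1).foldl (fun ns j =>
        pvSet2 ns (n - i - 1) (n - j - 1) (pvGet2 solution i j)) ns)
      ((PySem.List.pyRange 0 n 1).map (fun _ => (PySem.List.pyRange 0 n 1).map (fun _ => (0 : Int))))
  else if symmetry_type = "rotate_270" then
    (PySem.List.pyRange 0 n 1).foldl (fun ns i =>
      (PySem.List.pyRange 0 n 1).foldl (fun ns j =>
        pvSet2 ns (n - j - 1) i (pvGet2 solution i j)) ns)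
      ((PySem.List.pyRange 0 n 1).map (fun _ => (PySem.List.pyRange 0 n 1).map (fun _ => (0 : Int))))
  else new0

-- ===== PORT B =====
def apply_symmetry_alt (solution : List (List Int)) (n : Int) (symmetry_type : String) : List (List Int) :=
  -- sources.get(symmetry_type): the coordinate-permutation table
  let src? : Option (Int → Int → Int × Int) :=
    if symmetry_type = "horizontal" then some (fun i j => (i, n - 1 - j))
    else if symmetry_type = "vertical" then some (fun i j => (n - 1 - i, j))
    else if symmetry_type = "diagonal" then some (fun i j => (j, i))
    else if symmetry_type = "anti_diagonal" then some (fun i j => (n - 1 - j, n - 1 - i))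
    else if symmetry_type = "rotate_90" then some (fun i j => (n - 1 - j, i))
    else if symmetry_type = "rotate_180" then some (fun i j => (n - 1 - i, n - 1 - j))
    else if symmetry_type = "rotate_270" then some (fun i j => (j, n - 1 - i))
    else none
  match src? with
  | none => solution.map (fun row => PySem.List.slice row none none)   -- row[:]
  | some f =>
      (PySem.List.pyRange 0 n 1).map (fun i =>
        (PySem.List.pyRange 0 n 1).map (fun j => pvGet2 solution (f i j).1 (f i j).2))

-- ===== PRECONDITION & SPEC =====
-- For the seven recognised symmetry types Pre_ requires a square n×n board — the
-- function's natural domain; it excludes mismatched shapes, on which A raises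
-- IndexError or returns a partially transformed board. Unrecognised types are
-- unrestricted (both sides copy the board).
def Pre_apply_symmetry (solution : List (List Int)) (n : Int) (symmetry_type : String) : Prop :=
  symmetry_type ∈ (["horizontal", "vertical", "diagonal", "anti_diagonal",
                    "rotate_90", "rotate_180", "rotate_270"] : List String) →
    ((solution.length : Int) = n ∧ ∀ row ∈ solution, (row.length : Int) = n)
instance (solution : List (List Int)) (n : Int) (symmetry_type : String) : Decidable (Pre_apply_symmetry solution n symmetry_type) := by unfold Pre_apply_symmetry; infer_instance

def pvWitness_apply_symmetry : List (List Int) × Int × String := ([[0, 1], [1, 0]], 2, "rotate_90")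

def Spec_apply_symmetry (solution : List (List Int)) (n : Int) (symmetry_type : String) (out : List (List Int)) : Prop := out = apply_symmetry_alt solution n symmetry_type
instance (solution : List (List Int)) (n : Int) (symmetry_type : String) (out : List (List Int)) : Decidable (Spec_apply_symmetry solution n symmetry_type out) := by unfold Spec_apply_symmetry; infer_instance

-- ===== CLAIM (what is proved, stated in full; the proofs are below) =====
def Claim_equal_apply_symmetry : Prop := ∀ (solution : List (List Int)) (n : Int) (symmetry_type : String), Dom_apply_symmetry solution n symmetry_type → Pre_apply_symmetry solution n symmetry_type → Spec_apply_symmetry solution n symmetry_type (apply_symmetry solution n symmetry_type)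

-- ===== LEMMAS AND PROOFS =====

-- Nat-level views used only by the proofs.
def pvAt (g : List (List Int)) (r c : Nat) : Int := (g.getD r []).getD c 0

def pvMk (m : Nat) (f : Nat → Nat → Int) : List (List Int) :=
  (List.range m).map (fun r => (List.range m).map (fun c => f r c))

def pvW (g : List (List Int)) (w : Nat × Nat × Int) : List (List Int) :=
  g.set w.1 ((g.getD w.1 []).set w.2.1 w.2.2)

theorem pvGet2_eq_pvAt (g : List (List Int)) (i j : Int) : pvGet2 g i j = pvAt g i.toNat j.toNat := rfl

theorem pvSet2_eq_pvW (g : List (List Int)) (i j : Int) (v : Int) :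
    pvSet2 g i j v = pvW g (i.toNat, j.toNat, v) := rfl

theorem pvW_length (g : List (List Int)) (w : Nat × Nat × Int) : (pvW g w).length = g.length := by
  simp [pvW]

theorem pvW_rowlen (g : List (List Int)) (w : Nat × Nat × Int) (k : Nat) :
    ((pvW g w).getD k []).length = (g.getD k []).length := by
  rcases w with ⟨r, c, v⟩
  simp only [pvW, List.getD_eq_getElem?_getD, List.getElem?_set]
  by_cases h : r = k
  · subst h
    by_cases hr : r < g.length
    · simp [hr, List.getElem?_eq_getElem hr]
    · simp [hr, List.getElem?_eq_none (by omega : g.length ≤ r)]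
  · simp [h]

theorem pvAt_pvW_ne (g : List (List Int)) (w : Nat × Nat × Int) (a b : Nat)
    (h : (w.1, w.2.1) ≠ (a, b)) : pvAt (pvW g w) a b = pvAt g a b := by
  rcases w with ⟨r, c, v⟩
  unfold pvAt pvW
  by_cases hra : r = a
  · subst hra
    have hcb : c ≠ b := fun hcb => h (by rw [hcb])
    by_cases hr : r < g.length
    · have h1 : (g.set r ((g.getD r []).set c v)).getD r [] = (g.getD r []).set c v := by
        rw [List.getD_eq_getElem?_getD, List.getElem?_set]
        simp [hr]
      rw [h1, List.getD_eq_getElem?_getD, List.getElem?_set, if_neg hcb,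
        ← List.getD_eq_getElem?_getD]
    · rw [List.set_eq_of_length_le (by omega)]
  · have h1 : (g.set r ((g.getD r []).set c v)).getD a [] = g.getD a [] := by
      rw [List.getD_eq_getElem?_getD, List.getElem?_set, if_neg hra,
        ← List.getD_eq_getElem?_getD]
    rw [h1]

theorem pvAt_pvW_self (g : List (List Int)) (a b : Nat) (v : Int)
    (ha : a < g.length) (hb : b < (g.getD a []).length) :
    pvAt (pvW g (a, b, v)) a b = v := by
  have h1 : (pvW g (a, b, v)).getD a [] = (g.getD a []).set b v := by
    unfold pvW
    rw [List.getD_eq_getElem?_getD, List.getElem?_set]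
    simp [ha, List.getElem?_eq_getElem ha, List.getD_eq_getElem g [] ha]
  unfold pvAt
  rw [h1, List.getD_eq_getElem?_getD, List.getElem?_set]
  rw [List.getD_eq_getElem?_getD] at hb
  simp [hb]

theorem foldl_pvW_length (ws : List (Nat × Nat × Int)) : ∀ (g : List (List Int)),
    (ws.foldl pvW g).length = g.length := by
  induction ws with
  | nil => intro g; rfl
  | cons w ws ih => intro g; simp only [List.foldl_cons]; rw [ih, pvW_length]

theorem foldl_pvW_rowlen (ws : List (Nat × Nat × Int)) : ∀ (g : List (List Int)) (k : Nat),
    ((ws.foldl pvW g).getD k []).length = ((g.getD k []) : List Int).length := by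
  induction ws with
  | nil => intro g k; rfl
  | cons w ws ih => intro g k; simp only [List.foldl_cons]; rw [ih, pvW_rowlen]

theorem foldl_pvW_untouched (ws : List (Nat × Nat × Int)) : ∀ (g : List (List Int)) (a b : Nat),
    (∀ w ∈ ws, (w.1, w.2.1) ≠ (a, b)) →
    pvAt (ws.foldl pvW g) a b = pvAt g a b := by
  induction ws with
  | nil => intro g a b _; rfl
  | cons w ws ih =>
      intro g a b h
      simp only [List.foldl_cons]
      rw [ih _ _ _ (fun w' hw' => h w' (List.mem_cons_of_mem _ hw')),
        pvAt_pvW_ne _ _ _ _ (h w List.mem_cons_self)]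

theorem foldl_pvW_unique (ws : List (Nat × Nat × Int)) : ∀ (g : List (List Int)) (a b : Nat) (v : Int),
    a < g.length → b < (g.getD a []).length →
    (a, b, v) ∈ ws → (∀ w ∈ ws, w.1 = a → w.2.1 = b → w = (a, b, v)) →
    pvAt (ws.foldl pvW g) a b = v := by
  induction ws with
  | nil => intro g a b v _ _ hmem _; cases hmem
  | cons w ws ih =>
      intro g a b v ha hb hmem huniq
      simp only [List.foldl_cons]
      by_cases hm : (a, b, v) ∈ ws
      · exact ih _ _ _ _ (by rw [pvW_length]; exact ha) (by rw [pvW_rowlen]; exact hb) hm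
          (fun w' hw' h1 h2 => huniq w' (List.mem_cons_of_mem _ hw') h1 h2)
      · have hw : w = (a, b, v) := by
          rcases List.mem_cons.mp hmem with h | h
          · exact h.symm
          · exact absurd h hm
        subst hw
        rw [foldl_pvW_untouched _ _ _ _ ?_, pvAt_pvW_self _ _ _ _ ha hb]
        intro w' hw' hc
        have h1 : w'.1 = a := congrArg Prod.fst hc
        have h2 : w'.2.1 = b := congrArg (fun p => p.2) hc
        exact hm (huniq w' (List.mem_cons_of_mem _ hw') h1 h2 ▸ hw')

theorem grid_eq_mk (g : List (List Int)) (m : Nat) (f : Nat → Nat → Int)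
    (hl : g.length = m) (hr : ∀ r, r < m → (g.getD r []).length = m)
    (hv : ∀ r c, r < m → c < m → pvAt g r c = f r c) : g = pvMk m f := by
  have hlen : g.length = (pvMk m f).length := by simp [pvMk, hl]
  apply List.ext_getElem hlen
  intro i h1 h2
  have him : i < m := by rwa [hl] at h1
  have hrowD : g.getD i [] = g[i] := List.getD_eq_getElem g [] h1
  simp only [pvMk, List.getElem_map, List.getElem_range]
  have hrl : g[i].length = m := by rw [← hrowD]; exact hr i him
  apply List.ext_getElem (by simp [hrl])
  intro j hj1 hj2
  simp only [List.getElem_map, List.getElem_range]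
  have hjm : j < m := by rwa [hrl] at hj1
  have hvv := hv i j him hjm
  simp only [pvAt, hrowD] at hvv
  rw [← hvv, List.getD_eq_getElem g[i] 0 hj1]

theorem pyRange_cast (m : Nat) : PySem.List.pyRange 0 (m : Int) 1 = (List.range m).map (fun k : Nat => (k : Int)) := by
  rw [PySem.List.pyRange_one]
  have h : ((m : Int) - 0).toNat = m := by omega
  rw [h]
  apply List.map_congr_left
  intro k _
  omega

theorem pyRange_cast' (a m : Nat) : PySem.List.pyRange (a : Int) (m : Int) 1
    = (List.range (m - a)).map (fun k => ((a + k : Nat) : Int)) := by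
  rw [PySem.List.pyRange_one]
  have h : ((m : Int) - a).toNat = m - a := by omega
  rw [h]
  apply List.map_congr_left
  intro k _
  push_cast
  ring

-- B's branch: a uniform pass over the n×n coordinate grid, as a pvMk.
theorem alt_grid (sol : List (List Int)) (m : Nat) (σ : Int → Int → Int × Int) (τ : Nat → Nat → Nat × Nat)
    (h : ∀ r c : Nat, r < m → c < m → (σ (r : Int) (c : Int)).1.toNat = (τ r c).1 ∧ (σ (r : Int) (c : Int)).2.toNat = (τ r c).2) :
    (PySem.List.pyRange 0 (m : Int) 1).map (fun i => (PySem.List.pyRange 0 (m : Int) 1).map (fun j =>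
        pvGet2 sol (σ i j).1 (σ i j).2))
    = pvMk m (fun r c => pvAt sol (τ r c).1 (τ r c).2) := by
  rw [pyRange_cast]
  simp only [List.map_map]
  unfold pvMk
  apply List.map_congr_left
  intro r hrm
  have hr : r < m := List.mem_range.mp hrm
  simp only [Function.comp]
  apply List.map_congr_left
  intro c hcm
  have hc : c < m := List.mem_range.mp hcm
  simp only [Function.comp_apply]
  rw [pvGet2_eq_pvAt, (h r c hr hc).1, (h r c hr hc).2]

theorem map_reverse_eq_mk (sol : List (List Int)) (m : Nat)
    (hl : sol.length = m) (hrow : ∀ r, r < m → (sol.getD r []).length = m) :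
    sol.map List.reverse = pvMk m (fun r c => pvAt sol r (m - 1 - c)) := by
  apply grid_eq_mk
  · simp [hl]
  · intro r hrm
    have hr : r < sol.length := by omega
    rw [List.getD_eq_getElem?_getD, List.getElem?_map, List.getElem?_eq_getElem hr]
    simp only [Option.map_some, Option.getD_some, List.length_reverse]
    rw [← List.getD_eq_getElem sol [] hr]
    exact hrow r hrm
  · intro r c hrm hcm
    have hr : r < sol.length := by omega
    have hrowl : (sol.getD r []).length = m := hrow r hrm
    have hrowD : (sol.map List.reverse).getD r [] = (sol.getD r []).reverse := by
      rw [List.getD_eq_getElem?_getD, List.getElem?_map, List.getElem?_eq_getElem hr,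
        Option.map_some, Option.getD_some, List.getD_eq_getElem sol [] hr]
    simp only [pvAt, hrowD]
    have hc2 : c < (sol.getD r []).reverse.length := by
      rw [List.length_reverse, hrowl]; exact hcm
    rw [List.getD_eq_getElem _ 0 hc2, List.getElem_reverse,
      List.getD_eq_getElem _ 0 (by rw [hrowl]; omega)]
    congr 1
    rw [List.length_reverse] at hc2
    omega

theorem reverse_eq_mk (sol : List (List Int)) (m : Nat)
    (hl : sol.length = m) (hrow : ∀ r, r < m → (sol.getD r []).length = m) :
    sol.reverse = pvMk m (fun r c => pvAt sol (m - 1 - r) c) := by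
  apply grid_eq_mk
  · simp [hl]
  · intro r hrm
    have hr : r < sol.reverse.length := by rw [List.length_reverse]; omega
    rw [List.getD_eq_getElem _ [] hr, List.getElem_reverse,
      ← List.getD_eq_getElem sol [] (by omega)]
    exact hrow _ (by omega)
  · intro r c hrm hcm
    have hr : r < sol.reverse.length := by rw [List.length_reverse]; omega
    simp only [pvAt]
    rw [List.getD_eq_getElem _ [] hr, List.getElem_reverse,
      ← List.getD_eq_getElem sol [] (by omega), hl]

-- A's horizontal loop: reverse each row in place.
theorem range_fold_reverse : ∀ (k : Nat) (g : List (List Int)), k ≤ g.length →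
    (List.range k).foldl (fun ns i => ns.set i ((ns.getD i []).reverse)) g
      = (g.take k).map List.reverse ++ g.drop k := by
  intro k
  induction k with
  | zero => intro g _; simp
  | succ k ih =>
      intro g hk
      rw [List.range_succ, List.foldl_append, List.foldl_cons, List.foldl_nil, ih g (by omega)]
      have hklt : k < g.length := by omega
      have hlen : ((g.take k).map List.reverse).length = k := by
        simp [List.length_take]; omega
      have hgetD : ((g.take k).map List.reverse ++ g.drop k).getD k [] = g[k] := by
        rw [List.getD_eq_getElem?_getD, List.getElem?_append_right (by omega), hlen]
        simp [List.getElem?_drop, List.getElem?_eq_getElem hklt]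
      rw [hgetD]
      rw [List.drop_eq_getElem_cons hklt]
      rw [List.set_append]
      rw [if_neg (by omega), hlen, Nat.sub_self, List.set_cons_zero]
      rw [List.take_add_one, List.getElem?_eq_getElem hklt]
      simp
      have hk2 : k < (List.map List.reverse g).length := by simpa using hklt
      rw [List.take_add_one, List.getElem?_eq_getElem hk2, List.getElem_map]
      simp

def pvDiagPairs (m : Nat) : List (Nat × Nat) :=
  (List.range m).flatMap (fun r => (List.range (m - r - 1)).map (fun k => (r, r + 1 + k)))

def pvAntiPairs (m : Nat) : List (Nat × Nat) :=
  (List.range m).flatMap (fun r => (List.range (m - r - 1)).map (fun k => (r, k)))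

theorem mem_pvDiagPairs (m : Nat) (p : Nat × Nat) :
    p ∈ pvDiagPairs m ↔ p.1 < p.2 ∧ p.2 < m := by
  rcases p with ⟨x, y⟩
  simp only [pvDiagPairs, List.mem_flatMap, List.mem_map, List.mem_range, Prod.mk.injEq]
  constructor
  · rintro ⟨r, hr, k, hk, rfl, rfl⟩
    omega
  · rintro ⟨h1, h2⟩
    exact ⟨x, by omega, ⟨y - x - 1, by omega, rfl, by omega⟩⟩

theorem mem_pvAntiPairs (m : Nat) (p : Nat × Nat) :
    p ∈ pvAntiPairs m ↔ p.1 + p.2 + 1 < m := by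
  rcases p with ⟨x, y⟩
  simp only [pvAntiPairs, List.mem_flatMap, List.mem_map, List.mem_range, Prod.mk.injEq]
  constructor
  · rintro ⟨r, hr, k, hk, rfl, rfl⟩
    omega
  · intro h1
    exact ⟨x, by omega, ⟨y, by omega, rfl, rfl⟩⟩

theorem nodup_pvRowBlock (m : Nat) (f : Nat → Nat → Nat × Nat)
    (hfst : ∀ r k, (f r k).1 = r) (hinj : ∀ r k1 k2, f r k1 = f r k2 → k1 = k2) :
    ((List.range m).flatMap (fun r => (List.range (m - r - 1)).map (f r))).Nodup := by
  apply List.nodup_flatMap.mpr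
  constructor
  · intro r _
    refine List.Nodup.map ?_ List.nodup_range
    intro k1 k2 hk
    exact hinj r k1 k2 hk
  · refine List.pairwise_lt_range.imp ?_
    intro r s hrs p hp hq
    simp only [List.mem_map, List.mem_range] at hp hq
    rcases hp with ⟨k1, _, rfl⟩
    rcases hq with ⟨k2, _, hq⟩
    have h1 : (f s k2).1 = (f r k1).1 := congrArg Prod.fst hq
    rw [hfst, hfst] at h1
    omega

theorem nodup_pvDiagPairs (m : Nat) : (pvDiagPairs m).Nodup := by
  apply nodup_pvRowBlock m (fun r k => (r, r + 1 + k)) (fun _ _ => rfl)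
  intro r k1 k2 h
  have := congrArg Prod.snd h
  simp only at this
  omega

theorem nodup_pvAntiPairs (m : Nat) : (pvAntiPairs m).Nodup := by
  apply nodup_pvRowBlock m (fun r k => (r, k)) (fun _ _ => rfl)
  intro r k1 k2 h
  exact congrArg Prod.snd h

-- swap step (reads the current grid) and pure-write step (reads the original grid)
def pvSStep (c2 : Nat × Nat → Nat × Nat) (g : List (List Int)) (p : Nat × Nat) : List (List Int) :=
  pvW (pvW g (p.1, p.2, pvAt g (c2 p).1 (c2 p).2)) ((c2 p).1, (c2 p).2, pvAt g p.1 p.2)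

def pvPStep (sol : List (List Int)) (c2 : Nat × Nat → Nat × Nat) (g : List (List Int)) (p : Nat × Nat) : List (List Int) :=
  pvW (pvW g (p.1, p.2, pvAt sol (c2 p).1 (c2 p).2)) ((c2 p).1, (c2 p).2, pvAt sol p.1 p.2)

theorem sfold_eq_pfold (sol : List (List Int)) (c2 : Nat × Nat → Nat × Nat) :
    ∀ (ps : List (Nat × Nat)) (g : List (List Int)),
    (∀ p ∈ ps, pvAt g p.1 p.2 = pvAt sol p.1 p.2 ∧ pvAt g (c2 p).1 (c2 p).2 = pvAt sol (c2 p).1 (c2 p).2) →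
    ps.Pairwise (fun p q => p ≠ q ∧ p ≠ c2 q ∧ c2 p ≠ q ∧ c2 p ≠ c2 q) →
    ps.foldl (pvSStep c2) g = ps.foldl (pvPStep sol c2) g := by
  intro ps
  induction ps with
  | nil => intro g _ _; rfl
  | cons p ps ih =>
      intro g hag hpw
      simp only [List.foldl_cons]
      have hp := hag p List.mem_cons_self
      have hstep : pvSStep c2 g p = pvPStep sol c2 g p := by
        unfold pvSStep pvPStep
        rw [hp.1, hp.2]
      rw [hstep]
      rcases List.pairwise_cons.mp hpw with ⟨hhead, htail⟩
      apply ih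
      · intro q hq
        rcases hhead q hq with ⟨h1, h2, h3, h4⟩
        have e1 : pvAt (pvPStep sol c2 g p) q.1 q.2 = pvAt g q.1 q.2 := by
          unfold pvPStep
          rw [pvAt_pvW_ne _ _ _ _ (by exact h3), pvAt_pvW_ne _ _ _ _ (by exact h1)]
        have e2 : pvAt (pvPStep sol c2 g p) (c2 q).1 (c2 q).2 = pvAt g (c2 q).1 (c2 q).2 := by
          unfold pvPStep
          rw [pvAt_pvW_ne _ _ _ _ (by exact h4), pvAt_pvW_ne _ _ _ _ (by exact h2)]
        exact ⟨e1.trans (hag q (List.mem_cons_of_mem _ hq)).1,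
               e2.trans (hag q (List.mem_cons_of_mem _ hq)).2⟩
      · exact htail

theorem wlist_grid (z : List (List Int)) (m : Nat) (ws : List (Nat × Nat × Int)) (f : Nat → Nat → Int)
    (hzl : z.length = m) (hzr : ∀ k, k < m → (z.getD k []).length = m)
    (hcell : ∀ a b, a < m → b < m →
      ((a, b, f a b) ∈ ws ∧ ∀ w ∈ ws, w.1 = a → w.2.1 = b → w = (a, b, f a b))
      ∨ ((∀ w ∈ ws, (w.1, w.2.1) ≠ (a, b)) ∧ pvAt z a b = f a b)) :
    ws.foldl pvW z = pvMk m f := by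
  apply grid_eq_mk
  · rw [foldl_pvW_length, hzl]
  · intro r hr
    rw [foldl_pvW_rowlen]
    exact hzr r hr
  · intro a b ha hb
    rcases hcell a b ha hb with ⟨hmem, huniq⟩ | ⟨hnt, hval⟩
    · exact foldl_pvW_unique ws z a b (f a b) (by rw [hzl]; exact ha)
        (by rw [hzr a ha]; exact hb) hmem huniq
    · rw [foldl_pvW_untouched ws z a b hnt, hval]

theorem A_horizontal (sol : List (List Int)) :
    (PySem.List.pyRange 0 (sol.length : Int) 1).foldl
      (fun ns i => ns.set i.toNat ((PySem.List.slice? (ns.getD i.toNat []) none none (-1)).getD [])) sol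
    = sol.map List.reverse := by
  rw [pyRange_cast, List.foldl_map]
  have hstep : ∀ (ns : List (List Int)) (k : Nat),
      ns.set ((k : Int)).toNat ((PySem.List.slice? (ns.getD ((k : Int)).toNat []) none none (-1)).getD [])
        = ns.set k ((ns.getD k []).reverse) := by
    intro ns k
    rw [PySem.List.slice?_none_none_neg_one]
    simp
  simp only [hstep]
  rw [range_fold_reverse sol.length sol le_rfl]
  simp

theorem A_vertical (sol : List (List Int)) :
    (PySem.List.slice? sol none none (-1)).getD [] = sol.reverse := by
  rw [PySem.List.slice?_none_none_neg_one]
  rfl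

-- the fresh n×n zero grid the rotation branches start from
theorem z_shape (m : Nat) :
    (((PySem.List.pyRange 0 (m : Int) 1).map (fun _ => (PySem.List.pyRange 0 (m : Int) 1).map (fun _ => (0 : Int)))).length = m)
    ∧ (∀ k, k < m → (((PySem.List.pyRange 0 (m : Int) 1).map (fun _ => (PySem.List.pyRange 0 (m : Int) 1).map (fun _ => (0 : Int)))).getD k []).length = m) := by
  constructor
  · simp [pyRange_cast]
  · intro k hk
    have hk' : k < ((PySem.List.pyRange 0 (m : Int) 1).map (fun _ => (PySem.List.pyRange 0 (m : Int) 1).map (fun _ => (0 : Int)))).length := by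
      simp [pyRange_cast, hk]
    rw [List.getD_eq_getElem _ [] hk', List.getElem_map]
    simp [pyRange_cast]

theorem A_rot90 (sol : List (List Int)) (m : Nat) :
    ((PySem.List.pyRange 0 (m : Int) 1).foldl (fun ns i =>
      (PySem.List.pyRange 0 (m : Int) 1).foldl (fun ns j =>
        pvSet2 ns j ((m : Int) - i - 1) (pvGet2 sol i j)) ns)
      ((PySem.List.pyRange 0 (m : Int) 1).map (fun _ => (PySem.List.pyRange 0 (m : Int) 1).map (fun _ => (0 : Int)))))
    = pvMk m (fun a b => pvAt sol (m - 1 - b) a) := by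
  have hz := z_shape m
  rw [pyRange_cast, List.foldl_map]
  have houter : ∀ (ns : List (List Int)) (r : Nat), r ∈ List.range m →
      ((List.range m).map (fun k : Nat => (k : Int))).foldl (fun ns j =>
          pvSet2 ns j ((m : Int) - (r : Int) - 1) (pvGet2 sol (r : Int) j)) ns
      = ((List.range m).map (fun c => (c, m - 1 - r, pvAt sol r c))).foldl pvW ns := by
    intro ns r hr
    have hrm : r < m := List.mem_range.mp hr
    rw [List.foldl_map, List.foldl_map]
    apply PySem.List.foldl_congr_mem
    intro acc c _
    rw [pvSet2_eq_pvW, pvGet2_eq_pvAt]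
    have h2 : ((m : Int) - (r : Int) - 1).toNat = m - 1 - r := by omega
    simp only [Int.toNat_natCast, h2]
  have houter2 : ∀ (Z : List (List Int)),
      (List.range m).foldl (fun (ns : List (List Int)) (r : Nat) => ((List.range m).map (fun k : Nat => (k : Int))).foldl
          (fun ns j => pvSet2 ns j ((m : Int) - (r : Int) - 1) (pvGet2 sol (r : Int) j)) ns) Z
      = ((List.range m).flatMap (fun r => (List.range m).map (fun c => (c, m - 1 - r, pvAt sol r c)))).foldl pvW Z := by
    intro Z
    rw [List.foldl_flatMap]
    apply PySem.List.foldl_congr_mem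
    exact houter
  rw [houter2]
  apply wlist_grid _ m _ _ (by rw [← pyRange_cast]; exact hz.1)
    (by rw [← pyRange_cast]; exact hz.2)
  intro a b ha hb
  left
  constructor
  · simp only [List.mem_flatMap, List.mem_map, List.mem_range]
    refine ⟨m - 1 - b, by omega, a, ha, ?_⟩
    have hb' : m - 1 - (m - 1 - b) = b := by omega
    rw [hb']
  · intro w hw h1 h2
    simp only [List.mem_flatMap, List.mem_map, List.mem_range] at hw
    rcases hw with ⟨r, hr, c, hc, rfl⟩
    simp only at h1 h2
    subst h1
    have hrb : r = m - 1 - b := by omega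
    subst hrb
    rw [h2]

theorem A_rot180 (sol : List (List Int)) (m : Nat) :
    ((PySem.List.pyRange 0 (m : Int) 1).foldl (fun ns i =>
      (PySem.List.pyRange 0 (m : Int) 1).foldl (fun ns j =>
        pvSet2 ns ((m : Int) - i - 1) ((m : Int) - j - 1) (pvGet2 sol i j)) ns)
      ((PySem.List.pyRange 0 (m : Int) 1).map (fun _ => (PySem.List.pyRange 0 (m : Int) 1).map (fun _ => (0 : Int)))))
    = pvMk m (fun a b => pvAt sol (m - 1 - a) (m - 1 - b)) := by
  have hz := z_shape m
  rw [pyRange_cast, List.foldl_map]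
  have houter : ∀ (ns : List (List Int)) (r : Nat), r ∈ List.range m →
      ((List.range m).map (fun k : Nat => (k : Int))).foldl (fun ns j =>
          pvSet2 ns ((m : Int) - (r : Int) - 1) ((m : Int) - j - 1) (pvGet2 sol (r : Int) j)) ns
      = ((List.range m).map (fun c => (m - 1 - r, m - 1 - c, pvAt sol r c))).foldl pvW ns := by
    intro ns r hr
    have hrm : r < m := List.mem_range.mp hr
    rw [List.foldl_map, List.foldl_map]
    apply PySem.List.foldl_congr_mem
    intro acc c hc
    have hcm : c < m := List.mem_range.mp hc
    rw [pvSet2_eq_pvW, pvGet2_eq_pvAt]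
    have h1 : ((m : Int) - (r : Int) - 1).toNat = m - 1 - r := by omega
    have h2 : ((m : Int) - (c : Int) - 1).toNat = m - 1 - c := by omega
    simp only [Int.toNat_natCast, h1, h2]
  have houter2 : ∀ (Z : List (List Int)),
      (List.range m).foldl (fun (ns : List (List Int)) (r : Nat) => ((List.range m).map (fun k : Nat => (k : Int))).foldl
          (fun ns j => pvSet2 ns ((m : Int) - (r : Int) - 1) ((m : Int) - j - 1) (pvGet2 sol (r : Int) j)) ns) Z
      = ((List.range m).flatMap (fun r => (List.range m).map (fun c => (m - 1 - r, m - 1 - c, pvAt sol r c)))).foldl pvW Z := by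
    intro Z
    rw [List.foldl_flatMap]
    apply PySem.List.foldl_congr_mem
    exact houter
  rw [houter2]
  apply wlist_grid _ m _ _ (by rw [← pyRange_cast]; exact hz.1)
    (by rw [← pyRange_cast]; exact hz.2)
  intro a b ha hb
  left
  constructor
  · simp only [List.mem_flatMap, List.mem_map, List.mem_range]
    refine ⟨m - 1 - a, by omega, m - 1 - b, by omega, ?_⟩
    have ha' : m - 1 - (m - 1 - a) = a := by omega
    have hb' : m - 1 - (m - 1 - b) = b := by omega
    rw [ha', hb']
  · intro w hw h1 h2
    simp only [List.mem_flatMap, List.mem_map, List.mem_range] at hw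
    rcases hw with ⟨r, hr, c, hc, rfl⟩
    simp only at h1 h2
    have hra : r = m - 1 - a := by omega
    have hcb : c = m - 1 - b := by omega
    subst hra
    subst hcb
    rw [h1, h2]

theorem A_rot270 (sol : List (List Int)) (m : Nat) :
    ((PySem.List.pyRange 0 (m : Int) 1).foldl (fun ns i =>
      (PySem.List.pyRange 0 (m : Int) 1).foldl (fun ns j =>
        pvSet2 ns ((m : Int) - j - 1) i (pvGet2 sol i j)) ns)
      ((PySem.List.pyRange 0 (m : Int) 1).map (fun _ => (PySem.List.pyRange 0 (m : Int) 1).map (fun _ => (0 : Int)))))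
    = pvMk m (fun a b => pvAt sol b (m - 1 - a)) := by
  have hz := z_shape m
  rw [pyRange_cast, List.foldl_map]
  have houter : ∀ (ns : List (List Int)) (r : Nat), r ∈ List.range m →
      ((List.range m).map (fun k : Nat => (k : Int))).foldl (fun ns j =>
          pvSet2 ns ((m : Int) - j - 1) (r : Int) (pvGet2 sol (r : Int) j)) ns
      = ((List.range m).map (fun c => (m - 1 - c, r, pvAt sol r c))).foldl pvW ns := by
    intro ns r hr
    rw [List.foldl_map, List.foldl_map]
    apply PySem.List.foldl_congr_mem
    intro acc c hc
    have hcm : c < m := List.mem_range.mp hc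
    rw [pvSet2_eq_pvW, pvGet2_eq_pvAt]
    have h1 : ((m : Int) - (c : Int) - 1).toNat = m - 1 - c := by omega
    simp only [Int.toNat_natCast, h1]
  have houter2 : ∀ (Z : List (List Int)),
      (List.range m).foldl (fun (ns : List (List Int)) (r : Nat) => ((List.range m).map (fun k : Nat => (k : Int))).foldl
          (fun ns j => pvSet2 ns ((m : Int) - j - 1) (r : Int) (pvGet2 sol (r : Int) j)) ns) Z
      = ((List.range m).flatMap (fun r => (List.range m).map (fun c => (m - 1 - c, r, pvAt sol r c)))).foldl pvW Z := by
    intro Z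
    rw [List.foldl_flatMap]
    apply PySem.List.foldl_congr_mem
    exact houter
  rw [houter2]
  apply wlist_grid _ m _ _ (by rw [← pyRange_cast]; exact hz.1)
    (by rw [← pyRange_cast]; exact hz.2)
  intro a b ha hb
  left
  constructor
  · simp only [List.mem_flatMap, List.mem_map, List.mem_range]
    refine ⟨b, hb, m - 1 - a, by omega, ?_⟩
    have ha' : m - 1 - (m - 1 - a) = a := by omega
    rw [ha']
  · intro w hw h1 h2
    simp only [List.mem_flatMap, List.mem_map, List.mem_range] at hw
    rcases hw with ⟨r, hr, c, hc, rfl⟩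
    simp only at h1 h2
    subst h2
    have hca : c = m - 1 - a := by omega
    subst hca
    rw [h1]

theorem pfold_flat (sol : List (List Int)) (c2 : Nat × Nat → Nat × Nat) (ps : List (Nat × Nat)) (g : List (List Int)) :
    ps.foldl (pvPStep sol c2) g
    = (ps.flatMap (fun p => [(p.1, p.2, pvAt sol (c2 p).1 (c2 p).2), ((c2 p).1, (c2 p).2, pvAt sol p.1 p.2)])).foldl pvW g := by
  rw [List.foldl_flatMap]
  apply PySem.List.foldl_congr_mem
  intro acc p _
  rfl

theorem A_diag (sol : List (List Int)) (m : Nat)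
    (hl : sol.length = m) (hrow : ∀ r, r < m → (sol.getD r []).length = m) :
    ((PySem.List.pyRange 0 (m : Int) 1).foldl (fun ns i =>
      (PySem.List.pyRange (i + 1) (m : Int) 1).foldl (fun ns j =>
        let a := pvGet2 ns i j
        let b := pvGet2 ns j i
        pvSet2 (pvSet2 ns i j b) j i a) ns) sol)
    = pvMk m (fun r c => pvAt sol c r) := by
  rw [pyRange_cast, List.foldl_map]
  have houter : ∀ (ns : List (List Int)), ∀ r ∈ List.range m,
      (PySem.List.pyRange ((r : Int) + 1) (m : Int) 1).foldl (fun ns j =>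
        let a := pvGet2 ns (r : Int) j
        let b := pvGet2 ns j (r : Int)
        pvSet2 (pvSet2 ns (r : Int) j b) j (r : Int) a) ns
      = ((List.range (m - r - 1)).map (fun k => (r, r + 1 + k))).foldl (pvSStep (fun p => (p.2, p.1))) ns := by
    intro ns r _
    have hcast : ((r : Int) + 1) = ((r + 1 : Nat) : Int) := by push_cast; ring
    rw [hcast, pyRange_cast', List.foldl_map, List.foldl_map]
    have hmm : m - (r + 1) = m - r - 1 := by omega
    rw [hmm]
    apply PySem.List.foldl_congr_mem
    intro acc k _
    simp only [pvSStep, pvSet2_eq_pvW, pvGet2_eq_pvAt, Int.toNat_natCast]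
  have houter2 : ∀ (Z : List (List Int)),
      (List.range m).foldl (fun (ns : List (List Int)) (r : Nat) =>
        (PySem.List.pyRange ((r : Int) + 1) (m : Int) 1).foldl (fun ns j =>
          let a := pvGet2 ns (r : Int) j
          let b := pvGet2 ns j (r : Int)
          pvSet2 (pvSet2 ns (r : Int) j b) j (r : Int) a) ns) Z
      = (pvDiagPairs m).foldl (pvSStep (fun p => (p.2, p.1))) Z := by
    intro Z
    unfold pvDiagPairs
    rw [List.foldl_flatMap]
    apply PySem.List.foldl_congr_mem
    exact houter
  rw [houter2]
  rw [sfold_eq_pfold sol (fun p => (p.2, p.1)) (pvDiagPairs m) sol (fun p _ => ⟨rfl, rfl⟩) ?hpw]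
  case hpw =>
    refine (nodup_pvDiagPairs m).pairwise_of_forall_ne ?_
    intro p hp q hq hne
    rw [mem_pvDiagPairs] at hp hq
    rcases p with ⟨p1, p2⟩
    rcases q with ⟨q1, q2⟩
    simp only at hp hq
    dsimp only
    refine ⟨hne, ?_, ?_, ?_⟩
    · intro h; injection h with e1 e2; omega
    · intro h; injection h with e1 e2; omega
    · intro h
      injection h with e1 e2
      exact hne (by rw [e2, e1])
  rw [pfold_flat]
  apply wlist_grid _ m _ _ hl hrow
  intro a b ha hb
  rcases Nat.lt_trichotomy a b with hab | hab | hab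
  · left
    constructor
    · simp only [List.mem_flatMap]
      refine ⟨(a, b), (mem_pvDiagPairs m (a, b)).mpr ⟨hab, hb⟩, ?_⟩
      simp
    · intro w hw h1 h2
      simp only [List.mem_flatMap, List.mem_cons, List.not_mem_nil, or_false] at hw
      rcases hw with ⟨⟨p1, p2⟩, hp, hw | hw⟩ <;> rw [mem_pvDiagPairs] at hp <;> subst hw <;>
        simp only at h1 h2 hp <;> subst h1 <;> subst h2
      · rfl
      · omega
  · right
    subst hab
    constructor
    · intro w hw
      simp only [List.mem_flatMap, List.mem_cons, List.not_mem_nil, or_false] at hw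
      rcases hw with ⟨⟨p1, p2⟩, hp, hw | hw⟩ <;> rw [mem_pvDiagPairs] at hp <;> subst hw <;>
        simp only at hp ⊢ <;> intro h <;> injection h with e1 e2 <;> omega
    · rfl
  · left
    constructor
    · simp only [List.mem_flatMap]
      refine ⟨(b, a), (mem_pvDiagPairs m (b, a)).mpr ⟨hab, ha⟩, ?_⟩
      simp
    · intro w hw h1 h2
      simp only [List.mem_flatMap, List.mem_cons, List.not_mem_nil, or_false] at hw
      rcases hw with ⟨⟨p1, p2⟩, hp, hw | hw⟩ <;> rw [mem_pvDiagPairs] at hp <;> subst hw <;>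
        simp only at h1 h2 hp <;> subst h1 <;> subst h2
      · omega
      · rfl

theorem A_anti (sol : List (List Int)) (m : Nat)
    (hl : sol.length = m) (hrow : ∀ r, r < m → (sol.getD r []).length = m) :
    ((PySem.List.pyRange 0 (m : Int) 1).foldl (fun ns i =>
      (PySem.List.pyRange 0 ((m : Int) - i - 1) 1).foldl (fun ns j =>
        let a := pvGet2 ns i j
        let b := pvGet2 ns ((m : Int) - j - 1) ((m : Int) - i - 1)
        pvSet2 (pvSet2 ns i j b) ((m : Int) - j - 1) ((m : Int) - i - 1) a) ns) sol)
    = pvMk m (fun r c => pvAt sol (m - 1 - c) (m - 1 - r)) := by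
  rw [pyRange_cast, List.foldl_map]
  have houter : ∀ (ns : List (List Int)), ∀ r ∈ List.range m,
      (PySem.List.pyRange 0 ((m : Int) - (r : Int) - 1) 1).foldl (fun ns j =>
        let a := pvGet2 ns (r : Int) j
        let b := pvGet2 ns ((m : Int) - j - 1) ((m : Int) - (r : Int) - 1)
        pvSet2 (pvSet2 ns (r : Int) j b) ((m : Int) - j - 1) ((m : Int) - (r : Int) - 1) a) ns
      = ((List.range (m - r - 1)).map (fun k => (r, k))).foldl
          (pvSStep (fun p => (m - 1 - p.2, m - 1 - p.1))) ns := by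
    intro ns r hr
    have hrm : r < m := List.mem_range.mp hr
    have hcast : ((m : Int) - (r : Int) - 1) = ((m - r - 1 : Nat) : Int) := by omega
    rw [hcast, pyRange_cast, List.foldl_map, List.foldl_map]
    apply PySem.List.foldl_congr_mem
    intro acc k hk
    have hkm : k < m - r - 1 := List.mem_range.mp hk
    have e1 : ((m : Int) - (k : Int) - 1).toNat = m - 1 - k := by omega
    have e2 : ((m : Int) - (r : Int) - 1).toNat = m - 1 - r := by omega
    simp only [pvSStep, pvSet2_eq_pvW, pvGet2_eq_pvAt, Int.toNat_natCast, e1, e2]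
    have e3 : m - r - 1 = m - 1 - r := by omega
    rw [e3]
  have houter2 : ∀ (Z : List (List Int)),
      (List.range m).foldl (fun (ns : List (List Int)) (r : Nat) =>
        (PySem.List.pyRange 0 ((m : Int) - (r : Int) - 1) 1).foldl (fun ns j =>
          let a := pvGet2 ns (r : Int) j
          let b := pvGet2 ns ((m : Int) - j - 1) ((m : Int) - (r : Int) - 1)
          pvSet2 (pvSet2 ns (r : Int) j b) ((m : Int) - j - 1) ((m : Int) - (r : Int) - 1) a) ns) Z
      = (pvAntiPairs m).foldl (pvSStep (fun p => (m - 1 - p.2, m - 1 - p.1))) Z := by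
    intro Z
    unfold pvAntiPairs
    rw [List.foldl_flatMap]
    apply PySem.List.foldl_congr_mem
    exact houter
  rw [houter2]
  rw [sfold_eq_pfold sol (fun p => (m - 1 - p.2, m - 1 - p.1)) (pvAntiPairs m) sol
    (fun p _ => ⟨rfl, rfl⟩) ?hpw]
  case hpw =>
    refine (nodup_pvAntiPairs m).pairwise_of_forall_ne ?_
    intro p hp q hq hne
    rw [mem_pvAntiPairs] at hp hq
    rcases p with ⟨p1, p2⟩
    rcases q with ⟨q1, q2⟩
    simp only at hp hq
    dsimp only
    refine ⟨hne, ?_, ?_, ?_⟩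
    · intro h; injection h with e1 e2; omega
    · intro h; injection h with e1 e2; omega
    · intro h
      injection h with e1 e2
      have hq1 : p1 = q1 := by omega
      have hq2 : p2 = q2 := by omega
      exact hne (by rw [hq1, hq2])
  rw [pfold_flat]
  apply wlist_grid _ m _ _ hl hrow
  intro a b ha hb
  rcases Nat.lt_trichotomy (a + b + 1) m with hab | hab | hab
  · left
    constructor
    · simp only [List.mem_flatMap]
      refine ⟨(a, b), (mem_pvAntiPairs m (a, b)).mpr hab, ?_⟩
      simp
    · intro w hw h1 h2
      simp only [List.mem_flatMap, List.mem_cons, List.not_mem_nil, or_false] at hw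
      rcases hw with ⟨⟨p1, p2⟩, hp, hw | hw⟩ <;> rw [mem_pvAntiPairs] at hp <;> subst hw <;>
        simp only at h1 h2 hp
      · subst h1; subst h2; rfl
      · omega
  · right
    constructor
    · intro w hw
      simp only [List.mem_flatMap, List.mem_cons, List.not_mem_nil, or_false] at hw
      rcases hw with ⟨⟨p1, p2⟩, hp, hw | hw⟩ <;> rw [mem_pvAntiPairs] at hp <;> subst hw <;>
        simp only at hp ⊢ <;> intro h <;> injection h with e1 e2 <;> omega
    · have e1 : m - 1 - b = a := by omega
      have e2 : m - 1 - a = b := by omega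
      rw [e1, e2]
  · left
    have hpmem : (m - 1 - b) + (m - 1 - a) + 1 < m := by omega
    constructor
    · simp only [List.mem_flatMap]
      refine ⟨(m - 1 - b, m - 1 - a), (mem_pvAntiPairs m (m - 1 - b, m - 1 - a)).mpr hpmem, ?_⟩
      simp only [List.mem_cons, List.not_mem_nil, or_false]
      right
      have e1 : m - 1 - (m - 1 - a) = a := by omega
      have e2 : m - 1 - (m - 1 - b) = b := by omega
      rw [e1, e2]
    · intro w hw h1 h2
      simp only [List.mem_flatMap, List.mem_cons, List.not_mem_nil, or_false] at hw
      rcases hw with ⟨⟨p1, p2⟩, hp, hw | hw⟩ <;> rw [mem_pvAntiPairs] at hp <;> subst hw <;>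
        simp only at h1 h2 hp
      · omega
      · have hp1 : p1 = m - 1 - b := by omega
        have hp2 : p2 = m - 1 - a := by omega
        subst hp1; subst hp2
        have e1 : m - 1 - (m - 1 - a) = a := by omega
        have e2 : m - 1 - (m - 1 - b) = b := by omega
        rw [e1, e2]

theorem apply_symmetry_spec : Claim_equal_apply_symmetry := by
  intro sol n t _hdom hpre
  unfold Spec_apply_symmetry apply_symmetry apply_symmetry_alt
  have hsq : t ∈ (["horizontal", "vertical", "diagonal", "anti_diagonal",
      "rotate_90", "rotate_180", "rotate_270"] : List String) →
      (n = (sol.length : Int) ∧ ∀ r, r < sol.length → (sol.getD r []).length = sol.length) := by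
    intro hmem
    obtain ⟨hn, hrows⟩ := hpre hmem
    refine ⟨hn.symm, ?_⟩
    intro r hr
    have hm : sol.getD r [] ∈ sol := by
      rw [List.getD_eq_getElem sol [] hr]
      exact List.getElem_mem hr
    have := hrows _ hm
    omega
  by_cases h1 : t = "horizontal"
  · subst h1
    obtain ⟨hn, hrow⟩ := hsq (by simp)
    subst hn
    simp only [reduceIte]
    rw [A_horizontal sol, map_reverse_eq_mk sol sol.length rfl hrow]
    refine ((alt_grid sol sol.length (fun i j => (i, (sol.length : Int) - 1 - j)) (fun r c => (r, sol.length - 1 - c)) ?_)).symm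
    intro r c hr hc
    refine ⟨?_, ?_⟩ <;> dsimp only <;> omega
  · by_cases h2 : t = "vertical"
    · subst h2
      obtain ⟨hn, hrow⟩ := hsq (by simp)
      subst hn
      simp only [reduceIte]
      rw [A_vertical sol, reverse_eq_mk sol sol.length rfl hrow]
      refine ((alt_grid sol sol.length (fun i j => ((sol.length : Int) - 1 - i, j)) (fun r c => (sol.length - 1 - r, c)) ?_)).symm
      intro r c hr hc
      refine ⟨?_, ?_⟩ <;> dsimp only <;> omega
    · by_cases h3 : t = "diagonal"
      · subst h3
        obtain ⟨hn, hrow⟩ := hsq (by simp)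
        subst hn
        simp only [reduceIte]
        rw [A_diag sol sol.length rfl hrow]
        refine ((alt_grid sol sol.length (fun i j => (j, i)) (fun r c => (c, r)) ?_)).symm
        intro r c hr hc
        refine ⟨?_, ?_⟩ <;> dsimp only <;> omega
      · by_cases h4 : t = "anti_diagonal"
        · subst h4
          obtain ⟨hn, hrow⟩ := hsq (by simp)
          subst hn
          simp only [reduceIte]
          rw [A_anti sol sol.length rfl hrow]
          refine ((alt_grid sol sol.length (fun i j => ((sol.length : Int) - 1 - j, (sol.length : Int) - 1 - i))
            (fun r c => (sol.length - 1 - c, sol.length - 1 - r)) ?_)).symm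
          intro r c hr hc
          refine ⟨?_, ?_⟩ <;> dsimp only <;> omega
        · by_cases h5 : t = "rotate_90"
          · subst h5
            obtain ⟨hn, hrow⟩ := hsq (by simp)
            subst hn
            simp only [reduceIte]
            rw [A_rot90 sol sol.length]
            refine ((alt_grid sol sol.length (fun i j => ((sol.length : Int) - 1 - j, i))
              (fun r c => (sol.length - 1 - c, r)) ?_)).symm
            intro r c hr hc
            refine ⟨?_, ?_⟩ <;> dsimp only <;> omega
          · by_cases h6 : t = "rotate_180"
            · subst h6
              obtain ⟨hn, hrow⟩ := hsq (by simp)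
              subst hn
              simp only [reduceIte]
              rw [A_rot180 sol sol.length]
              refine ((alt_grid sol sol.length (fun i j => ((sol.length : Int) - 1 - i, (sol.length : Int) - 1 - j))
                (fun r c => (sol.length - 1 - r, sol.length - 1 - c)) ?_)).symm
              intro r c hr hc
              refine ⟨?_, ?_⟩ <;> dsimp only <;> omega
            · by_cases h7 : t = "rotate_270"
              · subst h7
                obtain ⟨hn, hrow⟩ := hsq (by simp)
                subst hn
                simp only [reduceIte]
                rw [A_rot270 sol sol.length]
                refine ((alt_grid sol sol.length (fun i j => (j, (sol.length : Int) - 1 - i))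
                  (fun r c => (c, sol.length - 1 - r)) ?_)).symm
                intro r c hr hc
                refine ⟨?_, ?_⟩ <;> dsimp only <;> omega
              · simp only [if_neg h1, if_neg h2, if_neg h3, if_neg h4, if_neg h5, if_neg h6, if_neg h7]
                simp [PySem.List.slice_none_none]
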